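-- pv_equiv track=rewrite | github.com/SamahGC/Stringology-Based-Motif-Discovery-for-EEG-Analysis | ctm_motif_discovery.py | cartesian_tree_encoding_numeric
-- ===== SOURCE A (Python) =====
-- def cartesian_tree_encoding_numeric(subseq):
--     """Return compact parentheses shape of min-Cartesian tree for numeric subsequence."""
--     stack = []
--     left = {}
--     right = {}
--
--     for i, val in enumerate(subseq):
--         last = None
--         while stack and subseq[stack[-1]] > val:
--             last = stack.pop()
--         if stack:
--             right[stack[-1]] = i
--         if last is not None:
--             left[i] = last
--         stack.append(i)
--
--     root = stack[0] if stack else None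
--
--     def encode(node):
--         if node is None:
--             return ""
--         return "(" + encode(left.get(node)) + encode(right.get(node)) + ")"
--
--     return encode(root)
-- ===== SOURCE B (Python) =====
-- def cartesian_tree_encoding_numeric(subseq):
--     """Return compact parentheses shape of min-Cartesian tree for numeric subsequence."""
--     def enc(seg):
--         if not seg:
--             return ""
--         m = seg.index(min(seg))
--         return "(" + enc(seg[:m]) + enc(seg[m + 1:]) + ")"
--     return enc(subseq)
-- ===== Notes on version B (the rewrite author's own statement) =====
-- stated objective: simpler
-- what changed: Replaces A's monotonic-stack construction with left/right pointer dicts plus a pointer-chasing encode by a direct recursive divide-and-conquer: split the list at the first occurrence of its minimum and recurse on the two halves.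
import Mathlib
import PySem

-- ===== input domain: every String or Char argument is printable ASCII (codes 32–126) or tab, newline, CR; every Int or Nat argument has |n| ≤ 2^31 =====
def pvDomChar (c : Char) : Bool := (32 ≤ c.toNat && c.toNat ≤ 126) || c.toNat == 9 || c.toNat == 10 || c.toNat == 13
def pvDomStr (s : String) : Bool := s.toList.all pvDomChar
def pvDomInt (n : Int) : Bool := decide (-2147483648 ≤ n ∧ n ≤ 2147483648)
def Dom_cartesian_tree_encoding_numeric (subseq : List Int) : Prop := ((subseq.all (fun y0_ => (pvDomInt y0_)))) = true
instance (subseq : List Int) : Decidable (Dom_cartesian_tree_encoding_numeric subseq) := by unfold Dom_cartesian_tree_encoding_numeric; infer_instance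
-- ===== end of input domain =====

-- B replaces A's monotonic-stack + left/right-dict construction by a direct recursive
-- split at the leftmost minimum (objective: simpler; not claimed faster).

-- ===== PORT A =====
-- the while loop 'while stack and subseq[stack[-1]] > val: last = stack.pop()';
-- the Python stack is represented top-first (append = cons, stack[-1] = head, stack[0] = getLast?).
-- subseq[stack[-1]] is ported with pyGetD (default irrelevant: stack indices are always in range).
def pvWhileA (subseq : List Int) (val : Int) : List Int → Option Int → List Int × Option Int
  | [], last => ([], last)
  | j :: st, last =>
    if PySem.List.pyGetD subseq j 0 > val then pvWhileA subseq val st (some j)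
    else (j :: st, last)

-- one iteration of the 'for i, val in enumerate(subseq)' loop
def pvStepA (subseq : List Int) (st : List Int × PySem.Dict Int Int × PySem.Dict Int Int)
    (iv : Int × Int) : List Int × PySem.Dict Int Int × PySem.Dict Int Int :=
  let (stack1, last) := pvWhileA subseq iv.2 st.1 none
  let R1 := match stack1 with | s :: _ => st.2.2.insert s iv.1 | [] => st.2.2
  let L1 := match last with | some l => st.2.1.insert iv.1 l | none => st.2.1
  (iv.1 :: stack1, L1, R1)

-- 'def encode(node)': fueled (subseq.length + 1 is always enough; fuel 0 is never reached)
def pvEncodeA (L R : PySem.Dict Int Int) : Nat → Option Int → String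
  | 0, _ => ""
  | _ + 1, none => ""
  | f + 1, some j => "(" ++ pvEncodeA L R f (L.get? j) ++ pvEncodeA L R f (R.get? j) ++ ")"

def cartesian_tree_encoding_numeric (subseq : List Int) : String :=
  let res := (PySem.List.enumerate subseq 0).foldl (pvStepA subseq)
      ([], PySem.Dict.empty, PySem.Dict.empty)
  -- root = stack[0] if stack else None
  pvEncodeA res.2.1 res.2.2 (subseq.length + 1) res.1.getLast?

-- ===== PORT B =====
-- 'def enc(seg)': split at the first occurrence of the minimum (min with no key = first
-- minimal element; .index = first occurrence). The 'none' branches are unreachable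
-- (min/index always succeed on a nonempty list) and mirror Python's '' base case.
def pvEncB (seg : List Int) : String :=
  match PySem.List.min? seg (fun x => x) with
  | none => ""
  | some v =>
    match h : PySem.List.index? seg v with
    | none => ""
    | some m =>
      "(" ++ pvEncB (PySem.List.slice seg none (some (m : Int)))
          ++ pvEncB (PySem.List.slice seg (some ((m : Int) + 1)) none) ++ ")"
termination_by seg.length
decreasing_by
  · rw [PySem.List.slice_to_natCast]
    obtain ⟨hm, -, -⟩ := PySem.List.getElem_of_index?_eq_some h
    simp only [List.length_take]
    omega
  · have e1 : ((m : Int) + 1) = ((m + 1 : Nat) : Int) := by push_cast; ring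
    rw [e1, PySem.List.slice_from_natCast]
    obtain ⟨hm, -, -⟩ := PySem.List.getElem_of_index?_eq_some h
    simp only [List.length_drop]
    omega

def cartesian_tree_encoding_numeric_alt (subseq : List Int) : String := pvEncB subseq

-- ===== PRECONDITION & SPEC =====
def Spec_cartesian_tree_encoding_numeric (subseq : List Int) (out : String) : Prop := out = cartesian_tree_encoding_numeric_alt subseq
instance (subseq : List Int) (out : String) : Decidable (Spec_cartesian_tree_encoding_numeric subseq out) := by unfold Spec_cartesian_tree_encoding_numeric; infer_instance

-- ===== CLAIM (what is proved, stated in full; the proofs are below) =====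
def Claim_equal_cartesian_tree_encoding_numeric : Prop := ∀ (subseq : List Int), Dom_cartesian_tree_encoding_numeric subseq → Spec_cartesian_tree_encoding_numeric subseq (cartesian_tree_encoding_numeric subseq)

-- ===== LEMMAS AND PROOFS =====

-- The common abstraction: the Cartesian tree as a spine stack.  An entry of the abstract
-- stack is (value, index, left subtree); the stack is kept top-first, matching the ports.
inductive PvTree where
  | leaf : PvTree
  | node : Int → PvTree → PvTree → PvTree
deriving DecidableEq, Repr

def pvShape : PvTree → String
  | .leaf => ""
  | .node _ l r => "(" ++ pvShape l ++ pvShape r ++ ")"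

def pvLabels : PvTree → List Int
  | .leaf => []
  | .node i l r => i :: (pvLabels l ++ pvLabels r)

def pvSize : PvTree → Nat
  | .leaf => 0
  | .node _ l r => pvSize l + pvSize r + 1

abbrev PvEntry := Int × Int × PvTree

def pvEntryLabels (e : PvEntry) : List Int := e.2.1 :: pvLabels e.2.2

-- collapse a (top-first) spine stack into one tree: each entry becomes the parent of the
-- tree collapsed so far (which is its right subtree)
def pvSpine (t0 : PvTree) (l : List PvEntry) : PvTree :=
  l.foldl (fun acc e => .node e.2.1 e.2.2 acc) t0

def pvStep (st : List PvEntry) (iv : Int × Int) : List PvEntry :=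
  (iv.2, iv.1, pvSpine .leaf (st.takeWhile (fun e => decide (iv.2 < e.1)))) ::
    st.dropWhile (fun e => decide (iv.2 < e.1))

def pvRun (pvs : List (Int × Int)) : List PvEntry := pvs.foldl pvStep []

-- reconstruct a tree from the two dicts, following A's encode
def pvTreeOf (L R : PySem.Dict Int Int) : Nat → Option Int → PvTree
  | 0, _ => .leaf
  | _ + 1, none => .leaf
  | f + 1, some j => .node j (pvTreeOf L R f (L.get? j)) (pvTreeOf L R f (R.get? j))

def pvAgrees (L R : PySem.Dict Int Int) (o : Option Int) (t : PvTree) : Prop :=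
  pvTreeOf L R (pvSize t + 1) o = t

def pvChain (R : PySem.Dict Int Int) : Option Int → List PvEntry → Prop
  | _, [] => True
  | above, e :: rest => R.get? e.2.1 = above ∧ pvChain R (some e.2.1) rest

def pvInv (subseq : List Int) (p : Nat) (stack : List Int)
    (L R : PySem.Dict Int Int) (ast : List PvEntry) : Prop :=
  stack = ast.map (·.2.1) ∧
  (∀ e ∈ ast, PySem.List.pyGetD subseq e.2.1 0 = e.1) ∧
  ((ast.map pvEntryLabels).flatten).Nodup ∧
  (∀ a ∈ (ast.map pvEntryLabels).flatten, 0 ≤ a ∧ a < (p : Int)) ∧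
  (∀ a : Int, (p : Int) ≤ a → L.get? a = none ∧ R.get? a = none) ∧
  (∀ e ∈ ast, pvAgrees L R (L.get? e.2.1) e.2.2) ∧
  pvChain R none ast

-- ---- generic spine / step facts ----

theorem pvSpine_append_singleton (t0 : PvTree) (l : List PvEntry) (e : PvEntry) :
    pvSpine t0 (l ++ [e]) = .node e.2.1 e.2.2 (pvSpine t0 l) := by
  simp [pvSpine, List.foldl_append]

theorem pvStep_append_bottom (st : List PvEntry) (b : PvEntry) (iv : Int × Int)
    (h : b.1 ≤ iv.2) : pvStep (st ++ [b]) iv = pvStep st iv ++ [b] := by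
  have hb : (fun e : PvEntry => decide (iv.2 < e.1)) b = false := by simp; omega
  unfold pvStep
  rw [List.takeWhile_append, List.dropWhile_append]
  by_cases hall : ∀ e ∈ st, iv.2 < e.1
  · have ht : st.takeWhile (fun e : PvEntry => decide (iv.2 < e.1)) = st :=
      List.takeWhile_eq_self_iff.mpr (by simpa using hall)
    have hd : st.dropWhile (fun e : PvEntry => decide (iv.2 < e.1)) = [] :=
      List.dropWhile_eq_nil_iff.mpr (by simpa using hall)
    simp [ht, hd, hb]
  · have ht : (st.takeWhile (fun e : PvEntry => decide (iv.2 < e.1))).length ≠ st.length := by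
      intro hlen
      exact hall (by
        intro e he
        have := List.takeWhile_eq_self_iff.mp
          ((List.takeWhile_sublist _).eq_of_length hlen) e he
        simpa using this)
    have hdrop : (st.dropWhile (fun e : PvEntry => decide (iv.2 < e.1))).isEmpty = false := by
      rw [List.isEmpty_eq_false_iff, Ne, List.dropWhile_eq_nil_iff]
      intro hall2
      exact hall (by intro e he; simpa using hall2 e he)
    simp [ht, hdrop]

theorem pvFoldl_append_bottom (pvs : List (Int × Int)) :
    ∀ (st : List PvEntry) (b : PvEntry), (∀ x ∈ pvs, b.1 ≤ x.2) →
      pvs.foldl pvStep (st ++ [b]) = pvs.foldl pvStep st ++ [b] := by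
  induction pvs with
  | nil => intro st b _; rfl
  | cons x xs ih =>
    intro st b h
    simp only [List.foldl_cons]
    rw [pvStep_append_bottom st b x (h x (by simp))]
    exact ih _ b (fun y hy => h y (by simp [hy]))

theorem pvStep_all_gt (st : List PvEntry) (iv : Int × Int) (h : ∀ e ∈ st, iv.2 < e.1) :
    pvStep st iv = [(iv.2, iv.1, pvSpine .leaf st)] := by
  have ht : st.takeWhile (fun e : PvEntry => decide (iv.2 < e.1)) = st :=
    List.takeWhile_eq_self_iff.mpr (by simpa using h)
  have hd : st.dropWhile (fun e : PvEntry => decide (iv.2 < e.1)) = [] :=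
    List.dropWhile_eq_nil_iff.mpr (by simpa using h)
  simp [pvStep, ht, hd]

theorem pvRun_vals (pvs : List (Int × Int)) :
    ∀ (st : List PvEntry) (e : PvEntry), e ∈ pvs.foldl pvStep st →
      e.1 ∈ pvs.map (·.2) ∨ e ∈ st := by
  induction pvs with
  | nil => intro st e he; right; exact he
  | cons x xs ih =>
    intro st e he
    rcases ih _ e he with h | h
    · left; simp at h ⊢; tauto
    · unfold pvStep at h
      rcases List.mem_cons.mp h with h | h
      · left; subst h; simp
      · right; exact (List.dropWhile_sublist _).subset h

-- ---- B equals the spine-stack abstraction ----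

theorem pvEncB_nil : pvEncB [] = "" := by
  rw [pvEncB]
  rfl

theorem pvRunB (n : Nat) : ∀ (seg : List Int) (p : Int), seg.length ≤ n →
    pvShape (pvSpine .leaf (pvRun (PySem.List.enumerate seg p))) = pvEncB seg := by
  induction n with
  | zero =>
    intro seg p h
    have : seg = [] := List.eq_nil_of_length_eq_zero (Nat.le_zero.mp h)
    subst this
    rw [pvEncB_nil]
    simp [pvRun, PySem.List.enumerate_nil, pvSpine, pvShape]
  | succ n ih =>
    intro seg p hlen
    rw [pvEncB.eq_def]
    split
    · -- min? = none : seg = []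
      rename_i hmin
      have : seg = [] := (PySem.List.min?_eq_none_iff seg _).mp hmin
      subst this
      simp [pvRun, PySem.List.enumerate_nil, pvSpine, pvShape]
    · rename_i v hmin
      have hvmem : v ∈ seg := PySem.List.min?_mem hmin
      have hvmin : ∀ y ∈ seg, v ≤ y := by
        have := PySem.List.min?_isMin hmin; simpa using this
      split
      · -- index? = none : impossible, but both sides still compare; derive contradiction
        rename_i hidx
        exact absurd hvmem ((PySem.List.index?_eq_none_iff seg v).mp hidx)
      · rename_i m hidx
        obtain ⟨pre, suf, hseg, hprelen, hvpre⟩ := (PySem.List.index?_eq_some_iff seg v m).mp hidx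
        have henum : PySem.List.enumerate seg p =
            PySem.List.enumerate pre p ++ (p + pre.length, v) ::
              PySem.List.enumerate suf (p + pre.length + 1) := by
          rw [hseg, PySem.List.enumerate_append, PySem.List.enumerate_cons]
        have hpre_gt : ∀ e ∈ pvRun (PySem.List.enumerate pre p), v < e.1 := by
          intro e he
          rcases pvRun_vals _ _ e he with h | h
          · rw [PySem.List.map_snd_enumerate] at h
            have hne : e.1 ≠ v := fun hc => hvpre (hc ▸ h)
            have hle : v ≤ e.1 := hvmin e.1 (by rw [hseg]; exact List.mem_append_left _ h)
            omega
          · simp at h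
        have hb : ∀ x ∈ PySem.List.enumerate suf (p + pre.length + 1),
            ((v : Int), ((p + pre.length : Int), pvSpine .leaf (pvRun (PySem.List.enumerate pre p)))).1 ≤ x.2 := by
          intro x hx
          obtain ⟨k, hk, rfl⟩ := (PySem.List.mem_enumerate_iff _ _ _).mp hx
          exact hvmin _ (by rw [hseg]; exact List.mem_append_right _ (by simp))
        have hrun : pvRun (PySem.List.enumerate seg p) =
            pvRun (PySem.List.enumerate suf (p + pre.length + 1)) ++
              [(v, ((p + pre.length : Int)), pvSpine .leaf (pvRun (PySem.List.enumerate pre p)))] := by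
          unfold pvRun
          rw [henum, List.foldl_append, List.foldl_cons, pvStep_all_gt _ _ hpre_gt]
          dsimp only
          exact pvFoldl_append_bottom _ [] _ hb
        rw [hrun, pvSpine_append_singleton]
        have htake : PySem.List.slice seg none (some (m : Int)) = pre := by
          rw [PySem.List.slice_to_natCast, hseg, ← hprelen, List.take_left]
        have hdrop : PySem.List.slice seg (some ((m : Int) + 1)) none = suf := by
          have e1 : ((m : Int) + 1) = ((m + 1 : Nat) : Int) := by push_cast; ring
          rw [e1, PySem.List.slice_from_natCast, hseg, ← hprelen]
          have hsplit : pre ++ v :: suf = (pre ++ [v]) ++ suf := by simp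
          rw [hsplit, show pre.length + 1 = (pre ++ [v]).length by simp, List.drop_left]
        have ih1 := ih pre p (by
          have : pre.length < seg.length := by rw [hseg]; simp
          omega)
        have ih2 := ih suf (p + pre.length + 1) (by
          have : suf.length < seg.length := by rw [hseg]; simp; omega
          omega)
        simp only [pvShape]
        rw [ih1, ih2, htake, hdrop]

-- ---- relating A's fueled encode to reconstructed trees ----

theorem pvEncodeA_eq_shape (L R : PySem.Dict Int Int) :
    ∀ f o, pvEncodeA L R f o = pvShape (pvTreeOf L R f o) := by
  intro f
  induction f with
  | zero => intro o; cases o <;> rfl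
  | succ f ih => intro o; cases o <;> simp [pvEncodeA, pvTreeOf, pvShape, ih]

theorem pvSize_eq_labels_length : ∀ t : PvTree, pvSize t = (pvLabels t).length := by
  intro t
  induction t with
  | leaf => rfl
  | node i l r ihl ihr => simp [pvSize, pvLabels, ihl, ihr]

theorem pvTreeOf_stable (L R : PySem.Dict Int Int) :
    ∀ t f f' o, pvSize t < f → pvSize t < f' → pvTreeOf L R f o = t → pvTreeOf L R f' o = t := by
  intro t
  induction t with
  | leaf =>
    intro f f' o _ _ heq
    match f', o with
    | 0, _ => rfl
    | g' + 1, none => rfl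
    | g' + 1, some j =>
      match f, heq with
      | g + 1, heq => exact absurd heq (by simp [pvTreeOf])
  | node i l r ihl ihr =>
    intro f f' o hf hf' heq
    match f, o, heq with
    | g + 1, none, heq => exact absurd heq (by simp [pvTreeOf])
    | g + 1, some j, heq =>
      simp only [pvTreeOf, PvTree.node.injEq] at heq
      obtain ⟨rfl, hl, hr⟩ := heq
      match f' with
      | g' + 1 =>
        simp only [pvTreeOf, PvTree.node.injEq]
        simp only [pvSize] at hf hf'
        exact ⟨by trivial, ihl g g' _ (by omega) (by omega) hl, ihr g g' _ (by omega) (by omega) hr⟩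

theorem pvAgrees_stable (L R : PySem.Dict Int Int) {t : PvTree} {o : Option Int} {f : Nat}
    (h : pvAgrees L R o t) (hf : pvSize t < f) : pvTreeOf L R f o = t :=
  pvTreeOf_stable L R t _ f o (by omega) hf h

theorem pvAgrees_frame (L R L' R' : PySem.Dict Int Int) :
    ∀ t o, pvAgrees L R o t →
      (∀ a ∈ pvLabels t, L'.get? a = L.get? a ∧ R'.get? a = R.get? a) →
      pvAgrees L' R' o t := by
  intro t
  induction t with
  | leaf =>
    intro o h _
    cases o with
    | none => rfl
    | some j => exact absurd h (by simp [pvAgrees, pvTreeOf])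
  | node i l r ihl ihr =>
    intro o h hframe
    cases o with
    | none => exact absurd h (by simp [pvAgrees, pvTreeOf])
    | some j =>
      unfold pvAgrees pvTreeOf at h
      simp only [PvTree.node.injEq] at h
      obtain ⟨rfl, hl, hr⟩ := h
      have hsl : pvSize l < pvSize (PvTree.node j l r) := by simp [pvSize]
      have hsr : pvSize r < pvSize (PvTree.node j l r) := by simp [pvSize]
      have hal : pvAgrees L R (L.get? j) l :=
        pvTreeOf_stable L R l _ _ _ hsl (by omega) hl
      have har : pvAgrees L R (R.get? j) r :=
        pvTreeOf_stable L R r _ _ _ hsr (by omega) hr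
      have hal' := ihl _ hal (fun a ha => hframe a (by simp [pvLabels, ha]))
      have har' := ihr _ har (fun a ha => hframe a (by simp [pvLabels, ha]))
      have hi := hframe j (by simp [pvLabels])
      unfold pvAgrees pvTreeOf
      simp only [PvTree.node.injEq]
      exact ⟨by trivial, by rw [hi.1]; exact pvAgrees_stable L' R' hal' hsl,
                  by rw [hi.2]; exact pvAgrees_stable L' R' har' hsr⟩

-- ---- chain and spine lemmas ----

theorem pvChain_append_left (R : PySem.Dict Int Int) :
    ∀ (l1 l2 : List PvEntry) (a : Option Int), pvChain R a (l1 ++ l2) → pvChain R a l1 := by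
  intro l1
  induction l1 with
  | nil => intro l2 a _; trivial
  | cons e t ih => intro l2 a h; exact ⟨h.1, ih l2 _ h.2⟩

theorem pvChain_append_right (R : PySem.Dict Int Int) :
    ∀ (l1 l2 : List PvEntry) (a : Option Int), pvChain R a (l1 ++ l2) → ∃ a', pvChain R a' l2 := by
  intro l1
  induction l1 with
  | nil => intro l2 a h; exact ⟨a, h⟩
  | cons e t ih => intro l2 a h; exact ih l2 _ h.2

theorem pvChain_congr (R R' : PySem.Dict Int Int) :
    ∀ (l : List PvEntry) (a : Option Int),
      (∀ e ∈ l, R'.get? e.2.1 = R.get? e.2.1) → pvChain R a l → pvChain R' a l := by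
  intro l
  induction l with
  | nil => intro a _ _; trivial
  | cons e t ih =>
    intro a hg h
    exact ⟨(hg e (by simp)).trans h.1, ih _ (fun e' he' => hg e' (by simp [he'])) h.2⟩

theorem pvSpine_agrees (L R : PySem.Dict Int Int) :
    ∀ (ast : List PvEntry) (above : Option Int) (t0 : PvTree),
      (∀ e ∈ ast, pvAgrees L R (L.get? e.2.1) e.2.2) →
      pvChain R above ast →
      pvAgrees L R above t0 →
      pvAgrees L R (ast.foldl (fun _ e => some e.2.1) above) (pvSpine t0 ast) := by
  intro ast
  induction ast with
  | nil => intro above t0 _ _ h; exact h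
  | cons e t ih =>
    intro above t0 h6 h7 h0
    have hnode : pvAgrees L R (some e.2.1) (.node e.2.1 e.2.2 t0) := by
      unfold pvAgrees pvTreeOf
      simp only [PvTree.node.injEq]
      have hs : pvSize (PvTree.node e.2.1 e.2.2 t0) = pvSize e.2.2 + pvSize t0 + 1 := rfl
      refine ⟨by trivial, ?_, ?_⟩
      · exact pvAgrees_stable L R (h6 e (by simp)) (by omega)
      · rw [h7.1]; exact pvAgrees_stable L R h0 (by omega)
    have := ih (some e.2.1) (.node e.2.1 e.2.2 t0)
      (fun e' he' => h6 e' (by simp [he'])) h7.2 hnode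
    simpa [pvSpine] using this

theorem pvFoldl_some_last (l : List PvEntry) (e : PvEntry) (a0 : Option Int) :
    (l ++ [e]).foldl (fun _ x => some x.2.1) a0 = some e.2.1 := by
  simp [List.foldl_append]

theorem pvGetLast_map (l : List PvEntry) :
    (l.map (·.2.1)).getLast? = l.foldl (fun _ e => some e.2.1) none := by
  rcases List.eq_nil_or_concat l with rfl | ⟨l', e, rfl⟩
  · rfl
  · rw [List.concat_eq_append, pvFoldl_some_last]
    simp

-- ---- the while loop against takeWhile/dropWhile ----

theorem pvWhileA_eq (subseq : List Int) (v : Int) :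
    ∀ (ast : List PvEntry) (last0 : Option Int),
      (∀ e ∈ ast, PySem.List.pyGetD subseq e.2.1 0 = e.1) →
      pvWhileA subseq v (ast.map (·.2.1)) last0 =
        ((ast.dropWhile (fun e => decide (v < e.1))).map (·.2.1),
         (ast.takeWhile (fun e => decide (v < e.1))).foldl (fun _ e => some e.2.1) last0) := by
  intro ast
  induction ast with
  | nil => intro last0 _; rfl
  | cons e t ih =>
    intro last0 hval
    have he : PySem.List.pyGetD subseq e.2.1 0 = e.1 := hval e (by simp)
    simp only [List.map_cons, pvWhileA, he]
    by_cases hc : v < e.1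
    · rw [if_pos (by omega), ih (some e.2.1) (fun e' he' => hval e' (by simp [he']))]
      rw [List.dropWhile_cons, List.takeWhile_cons]
      simp [hc]
    · rw [if_neg (by omega)]
      rw [List.dropWhile_cons, List.takeWhile_cons]
      simp [hc]

theorem pvStepA_eq (subseq : List Int) (v : Int) (i : Int)
    (L R : PySem.Dict Int Int) (ast : List PvEntry)
    (hval : ∀ e ∈ ast, PySem.List.pyGetD subseq e.2.1 0 = e.1) :
    pvStepA subseq (ast.map (·.2.1), L, R) (i, v) =
      (i :: (ast.dropWhile (fun e => decide (v < e.1))).map (·.2.1),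
       (match (ast.takeWhile (fun e => decide (v < e.1))).foldl (fun _ e => some e.2.1) none with
        | some l => L.insert i l | none => L),
       (match (ast.dropWhile (fun e => decide (v < e.1))).map (·.2.1) with
        | s :: _ => R.insert s i | [] => R)) := by
  unfold pvStepA
  rw [pvWhileA_eq subseq v ast none hval]

-- ---- labels of a spine ----

theorem pvLabels_spine : ∀ (l : List PvEntry) (t0 : PvTree),
    (pvLabels (pvSpine t0 l)).Perm ((l.map pvEntryLabels).flatten ++ pvLabels t0) := by
  intro l
  induction l with
  | nil => intro t0; simp [pvSpine]
  | cons e t ih =>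
    intro t0
    have h1 : pvSpine t0 (e :: t) = pvSpine (.node e.2.1 e.2.2 t0) t := rfl
    rw [h1]
    refine (ih _).trans ?_
    rw [← Multiset.coe_eq_coe]
    simp only [List.map_cons, List.flatten_cons, pvLabels, pvEntryLabels,
      ← Multiset.coe_add, ← Multiset.cons_coe]
    simp only [← Multiset.singleton_add]
    abel

-- bound the length of a nodup list of integers in [0, n)
theorem pvNodup_length_le (l : List Int) (n : Nat) (hnd : l.Nodup)
    (hb : ∀ a ∈ l, 0 ≤ a ∧ a < (n : Int)) : l.length ≤ n := by
  classical
  have hsub : l.toFinset ⊆ Finset.Ico (0 : Int) n := by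
    intro a ha
    rw [List.mem_toFinset] at ha
    rw [Finset.mem_Ico]
    exact hb a ha
  have hcard := Finset.card_le_card hsub
  rw [List.toFinset_card_of_nodup hnd] at hcard
  simpa using hcard

-- ---- one loop iteration preserves the invariant ----

theorem pvStep_inv (subseq : List Int) (p : Nat) (L R : PySem.Dict Int Int)
    (ast : List PvEntry) (v : Int)
    (hinv : pvInv subseq p (ast.map (·.2.1)) L R ast)
    (hv : PySem.List.pyGetD subseq (p : Int) 0 = v) :
    pvInv subseq (p + 1)
      ((p : Int) :: (ast.dropWhile (fun e => decide (v < e.1))).map (·.2.1))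
      (match (ast.takeWhile (fun e => decide (v < e.1))).foldl (fun _ e => some e.2.1) none with
       | some l => L.insert (p : Int) l | none => L)
      (match (ast.dropWhile (fun e => decide (v < e.1))).map (·.2.1) with
       | s :: _ => R.insert s (p : Int) | [] => R)
      (pvStep ast ((p : Int), v)) := by
  obtain ⟨h1, h2, h3, h4, h5, h6, h7⟩ := hinv
  set c : PvEntry → Bool := fun e => decide (v < e.1) with hc
  set popped := ast.takeWhile c with hpopped
  set rest := ast.dropWhile c with hrest
  set last : Option Int := popped.foldl (fun _ e => some e.2.1) none with hlast
  set L1 := (match last with | some l => L.insert (p : Int) l | none => L) with hL1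
  set R1 := (match rest.map (·.2.1) with | s :: _ => R.insert s (p : Int) | [] => R) with hR1
  have hsplit : popped ++ rest = ast := List.takeWhile_append_dropWhile
  have hmem_popped : ∀ e ∈ popped, e ∈ ast := fun e he => (List.takeWhile_sublist _).subset he
  have hmem_rest : ∀ e ∈ rest, e ∈ ast := fun e he => (List.dropWhile_sublist _).subset he
  have hflat : (ast.map pvEntryLabels).flatten =
      (popped.map pvEntryLabels).flatten ++ (rest.map pvEntryLabels).flatten := by
    rw [← hsplit, List.map_append, List.flatten_append]
  have hmemflat : ∀ e ∈ ast, ∀ a ∈ pvEntryLabels e, a ∈ (ast.map pvEntryLabels).flatten := by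
    intro e he a ha
    exact List.mem_flatten.mpr ⟨pvEntryLabels e, List.mem_map_of_mem he, ha⟩
  have hidxflat : ∀ e ∈ ast, e.2.1 ∈ (ast.map pvEntryLabels).flatten := by
    intro e he; exact hmemflat e he e.2.1 (by simp [pvEntryLabels])
  have hidx_lt : ∀ e ∈ ast, e.2.1 < (p : Int) := fun e he => (h4 _ (hidxflat e he)).2
  -- the dicts change only at keys p (left) and the index of the surviving top (right)
  have hL1_get : ∀ a : Int, a ≠ (p : Int) → L1.get? a = L.get? a := by
    intro a ha
    rw [hL1]
    cases last with
    | none => rfl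
    | some l => exact PySem.Dict.get?_insert_of_ne _ _ ha
  have hL1_p : L1.get? (p : Int) = last := by
    rw [hL1]
    cases hl : last with
    | none => exact (h5 (p : Int) le_rfl).1
    | some l => exact PySem.Dict.get?_insert_self _ _ _
  have hR1_get : ∀ a : Int, (∀ e0 ∈ rest.head?, a ≠ e0.2.1) → R1.get? a = R.get? a := by
    intro a ha
    rw [hR1]
    cases hr : rest with
    | nil => rfl
    | cons e0 t =>
      simp only [List.map_cons]
      exact PySem.Dict.get?_insert_of_ne _ _ (ha e0 (by simp [hr]))
  have hR1_head : ∀ e0 ∈ rest.head?, R1.get? e0.2.1 = some (p : Int) := by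
    intro e0 he0
    rw [hR1]
    cases hr : rest with
    | nil => simp [hr] at he0
    | cons e0' t =>
      rw [hr] at he0
      simp at he0
      subst he0
      simp only [List.map_cons]
      exact PySem.Dict.get?_insert_self _ _ _
  -- nodup structure of the label lists
  have hnd_pr : ((popped.map pvEntryLabels).flatten ++ (rest.map pvEntryLabels).flatten).Nodup := by
    rw [← hflat]; exact h3
  have hdisj : ∀ a, a ∈ (popped.map pvEntryLabels).flatten →
      a ∈ (rest.map pvEntryLabels).flatten → False := by
    intro a h1' h2'
    exact (List.disjoint_of_nodup_append hnd_pr) h1' h2'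
  have hspine_labels := pvLabels_spine popped .leaf
  have hspine_mem : ∀ a ∈ pvLabels (pvSpine .leaf popped),
      a ∈ (popped.map pvEntryLabels).flatten := by
    intro a ha
    have := hspine_labels.mem_iff.mp ha
    simpa [pvLabels] using this
  -- fresh key p is in no current label list
  have hp_not : (p : Int) ∉ (ast.map pvEntryLabels).flatten := by
    intro hmem
    exact absurd (h4 _ hmem).2 (by omega)
  -- the head of rest is in no popped tree and differs from deeper rest indices
  have hhead_not_spine : ∀ e0 ∈ rest.head?, ∀ a ∈ pvLabels (pvSpine .leaf popped), a ≠ e0.2.1 := by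
    intro e0 he0 a ha heq
    apply hdisj a (hspine_mem a ha)
    subst heq
    cases hr : rest with
    | nil => simp [hr] at he0
    | cons e0' t =>
      rw [hr] at he0; simp at he0; subst he0
      simp [pvEntryLabels]
  -- frame: any tree agreed under (L, R) whose labels live in the old flat list still agrees
  have hframe : ∀ (o : Option Int) (t : PvTree),
      (∀ a ∈ pvLabels t, a ∈ (ast.map pvEntryLabels).flatten) →
      (∀ e0 ∈ rest.head?, ∀ a ∈ pvLabels t, a ≠ e0.2.1) →
      pvAgrees L R o t → pvAgrees L1 R1 o t := by
    intro o t hflt hhd hag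
    refine pvAgrees_frame L R L1 R1 t o hag ?_
    intro a ha
    have hap : a ≠ (p : Int) := fun hc => hp_not (hc ▸ hflt a ha)
    exact ⟨hL1_get a hap, hR1_get a (fun e0 he0 => hhd e0 he0 a ha)⟩
  -- the popped part collapses into the new left tree, agreed by L1, R1
  have hpop_agrees : pvAgrees L1 R1 last (pvSpine .leaf popped) := by
    have h0 : pvAgrees L R none .leaf := rfl
    have hch : pvChain R none popped := pvChain_append_left R popped rest none (hsplit ▸ h7)
    have := pvSpine_agrees L R popped none .leaf
      (fun e he => h6 e (hmem_popped e he)) hch h0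
    rw [← hlast] at this
    refine hframe last (pvSpine .leaf popped) ?_ hhead_not_spine this
    intro a ha
    exact hflat ▸ List.mem_append_left _ (hspine_mem a ha)
  -- now rebuild the invariant for the new state
  have hstep : pvStep ast ((p : Int), v) = (v, (p : Int), pvSpine .leaf popped) :: rest := rfl
  rw [hstep]
  refine ⟨?_, ?_, ?_, ?_, ?_, ?_, ?_⟩
  · simp
  · intro e he
    rcases List.mem_cons.mp he with rfl | he'
    · exact hv
    · exact h2 e (hmem_rest e he')
  · -- Nodup of the new flattened label lists
    have hperm : ((((v, (p : Int), pvSpine .leaf popped) : PvEntry) :: rest).map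
        pvEntryLabels).flatten.Perm ((p : Int) :: (ast.map pvEntryLabels).flatten) := by
      simp only [List.map_cons, List.flatten_cons, pvEntryLabels, hflat]
      have hsp : (pvLabels (pvSpine PvTree.leaf popped)).Perm
          ((popped.map pvEntryLabels).flatten) := by
        simpa [pvLabels] using hspine_labels
      exact List.Perm.cons _ (hsp.append_right _)
    refine hperm.nodup_iff.mpr ?_
    exact List.nodup_cons.mpr ⟨hp_not, h3⟩
  · intro a ha
    -- same perm as above, membership version
    simp only [List.map_cons, List.flatten_cons, pvEntryLabels, List.mem_append,
      List.mem_cons] at ha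
    rcases ha with (rfl | ha) | ha
    · constructor <;> omega
    · obtain ⟨hb1, hb2⟩ := h4 a (hflat ▸ List.mem_append_left _ (hspine_mem a ha))
      exact ⟨hb1, by omega⟩
    · obtain ⟨hb1, hb2⟩ := h4 a (hflat ▸ List.mem_append_right _ ha)
      exact ⟨hb1, by omega⟩
  · intro a ha
    have hap : a ≠ (p : Int) := by omega
    constructor
    · rw [hL1_get a hap]; exact (h5 a (by omega)).1
    · rw [hR1_get a ?_]
      · exact (h5 a (by omega)).2
      · intro e0 he0 heq
        have : e0.2.1 < (p : Int) := hidx_lt e0 (hmem_rest e0 (List.mem_of_mem_head? he0))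
        omega
  · intro e he
    rcases List.mem_cons.mp he with rfl | he'
    · simpa [hL1_p] using hpop_agrees
    · have hidx : e.2.1 ≠ (p : Int) := by
        have := hidx_lt e (hmem_rest e he'); omega
      rw [hL1_get e.2.1 hidx]
      refine hframe (L.get? e.2.1) e.2.2 ?_ ?_ (h6 e (hmem_rest e he'))
      · intro a ha
        exact hmemflat e (hmem_rest e he') a (by simp [pvEntryLabels, ha])
      · -- a label inside e's left tree is never the surviving top index
        intro e0 he0 a ha heq
        cases hr : rest with
        | nil => simp [hr] at he0
        | cons e0' t =>
          rw [hr] at he0 he'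
          simp at he0
          subst he0
          have hnd_rest : ((rest.map pvEntryLabels).flatten).Nodup :=
            (List.nodup_append.mp hnd_pr).2.1
          rw [hr] at hnd_rest
          simp only [List.map_cons, List.flatten_cons, pvEntryLabels] at hnd_rest
          rcases List.mem_cons.mp he' with rfl | he''
          · -- e is the surviving top itself: its own index is not inside its left tree
            have := (List.nodup_cons.mp hnd_rest).1
            exact this (by subst heq; exact List.mem_append_left _ ha)
          · -- e is deeper: label sets are disjoint from the top's entry labels
            have hnd2 := (List.nodup_cons.mp hnd_rest).1
            apply hnd2
            apply List.mem_append_right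
            refine List.mem_flatten.mpr ⟨pvEntryLabels e, List.mem_map_of_mem he'', ?_⟩
            subst heq
            simp [pvEntryLabels, ha]
  · -- the chain
    refine ⟨?_, ?_⟩
    · rw [hR1_get (p : Int) ?_]
      · exact (h5 (p : Int) le_rfl).2
      · intro e0 he0 heq
        have := hidx_lt e0 (hmem_rest e0 (List.mem_of_mem_head? he0))
        omega
    · cases hr : rest with
      | nil => trivial
      | cons e0 t =>
        refine ⟨by rw [hR1_head e0 (by simp [hr])], ?_⟩
        have hch : ∃ a', pvChain R a' (e0 :: t) := by
          rw [← hr]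
          exact pvChain_append_right R popped rest none (hsplit ▸ h7)
        obtain ⟨a', hch⟩ := hch
        refine pvChain_congr R R1 t (some e0.2.1) ?_ hch.2
        intro e' he'
        refine hR1_get e'.2.1 ?_
        intro e0' he0' heq
        rw [hr] at he0'
        simp at he0'
        subst he0'
        -- e'.2.1 = e0.2.1 contradicts nodup of rest's labels
        have hnd_rest : ((rest.map pvEntryLabels).flatten).Nodup :=
          (List.nodup_append.mp hnd_pr).2.1
        rw [hr] at hnd_rest
        simp only [List.map_cons, List.flatten_cons, pvEntryLabels] at hnd_rest
        have hnd2 := (List.nodup_cons.mp hnd_rest).1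
        apply hnd2
        apply List.mem_append_right
        refine List.mem_flatten.mpr ⟨pvEntryLabels e', List.mem_map_of_mem he', ?_⟩
        rw [← heq]
        simp [pvEntryLabels]

-- ---- running the whole loop ----

theorem pvRunA (subseq : List Int) :
    ∀ (ws : List Int) (p : Nat) (L R : PySem.Dict Int Int) (ast : List PvEntry),
      subseq.drop p = ws → pvInv subseq p (ast.map (·.2.1)) L R ast →
      pvInv subseq (p + ws.length)
        ((PySem.List.enumerate ws (p : Int)).foldl (pvStepA subseq) (ast.map (·.2.1), L, R)).1
        ((PySem.List.enumerate ws (p : Int)).foldl (pvStepA subseq) (ast.map (·.2.1), L, R)).2.1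
        ((PySem.List.enumerate ws (p : Int)).foldl (pvStepA subseq) (ast.map (·.2.1), L, R)).2.2
        ((PySem.List.enumerate ws (p : Int)).foldl pvStep ast) := by
  intro ws
  induction ws with
  | nil =>
    intro p L R ast _ hinv
    simpa [PySem.List.enumerate_nil] using hinv
  | cons w ws ih =>
    intro p L R ast hdrop hinv
    obtain ⟨h1, h2, h3, h4, h5, h6, h7⟩ := hinv
    have hv : PySem.List.pyGetD subseq (p : Int) 0 = w := by
      have hget : subseq[p]? = some w := by
        have h0 : (subseq.drop p)[0]? = some w := by rw [hdrop]; rfl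
        rw [List.getElem?_drop] at h0
        simpa using h0
      rw [PySem.List.pyGetD_natCast]
      rw [List.getD_eq_getElem?_getD, hget]
      rfl
    rw [PySem.List.enumerate_cons, List.foldl_cons, List.foldl_cons]
    rw [pvStepA_eq subseq w (p : Int) L R ast h2]
    have hstep := pvStep_inv subseq p L R ast w ⟨rfl, h2, h3, h4, h5, h6, h7⟩ hv
    have hstepeq : pvStep ast ((p : Int), w) =
        ((w, (p : Int), pvSpine .leaf (ast.takeWhile (fun e => decide (w < e.1)))) ::
          ast.dropWhile (fun e => decide (w < e.1))) := rfl
    have hcast : (p : Int) + 1 = ((p + 1 : Nat) : Int) := by push_cast; ring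
    rw [hcast]
    have hdrop' : subseq.drop (p + 1) = ws := by
      have : subseq.drop (p + 1) = (subseq.drop p).drop 1 := by
        rw [List.drop_drop]
      rw [this, hdrop]
      rfl
    have := ih (p + 1)
      (match (ast.takeWhile (fun e => decide (w < e.1))).foldl (fun _ e => some e.2.1) none with
       | some l => L.insert (p : Int) l | none => L)
      (match (ast.dropWhile (fun e => decide (w < e.1))).map (·.2.1) with
       | s :: _ => R.insert s (p : Int) | [] => R)
      (pvStep ast ((p : Int), w)) hdrop' (by
        rw [hstepeq]
        simpa [hstepeq] using hstep)
    rw [hstepeq] at this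
    simp only [List.map_cons] at this
    have hlen : p + (w :: ws).length = (p + 1) + ws.length := by simp; omega
    rw [hlen]
    exact this

-- ---- the whole of A equals the spine abstraction ----

theorem pvA_eq_spine (subseq : List Int) :
    cartesian_tree_encoding_numeric subseq =
      pvShape (pvSpine .leaf (pvRun (PySem.List.enumerate subseq 0))) := by
  have hinv0 : pvInv subseq 0 (([] : List PvEntry).map (·.2.1))
      PySem.Dict.empty PySem.Dict.empty [] := by
    refine ⟨rfl, by simp, by simp, by simp, ?_, by simp, trivial⟩
    intro a _
    exact ⟨PySem.Dict.get?_empty a, PySem.Dict.get?_empty a⟩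
  have hrun := pvRunA subseq subseq 0 PySem.Dict.empty PySem.Dict.empty [] (by simp) hinv0
  simp only [Nat.cast_zero, Nat.zero_add, List.map_nil] at hrun
  set res := (PySem.List.enumerate subseq 0).foldl (pvStepA subseq)
      ([], PySem.Dict.empty, PySem.Dict.empty) with hres
  set ast := (PySem.List.enumerate subseq 0).foldl pvStep [] with hast
  obtain ⟨h1, h2, h3, h4, h5, h6, h7⟩ := hrun
  have hlen_enum : (PySem.List.enumerate subseq 0).length = subseq.length :=
    PySem.List.length_enumerate subseq 0
  -- the claimed tree
  have hagrees : pvAgrees res.2.1 res.2.2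
      (ast.foldl (fun _ e => some e.2.1) none) (pvSpine .leaf ast) :=
    pvSpine_agrees res.2.1 res.2.2 ast none .leaf h6 h7 rfl
  have hroot : res.1.getLast? = ast.foldl (fun _ e => some e.2.1) none := by
    rw [h1, pvGetLast_map]
  have hsize : pvSize (pvSpine .leaf ast) < subseq.length + 1 := by
    rw [pvSize_eq_labels_length]
    have hperm := pvLabels_spine ast .leaf
    rw [hperm.length_eq]
    simp only [pvLabels, List.append_nil]
    have := pvNodup_length_le ((ast.map pvEntryLabels).flatten) (subseq.length) h3
      (fun a ha => (h4 a ha).imp id (by intro h; omega))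
    omega
  show pvEncodeA res.2.1 res.2.2 (subseq.length + 1) res.1.getLast? = _
  rw [pvEncodeA_eq_shape, hroot, pvAgrees_stable _ _ hagrees hsize]
  rfl

theorem cartesian_tree_encoding_numeric_spec : Claim_equal_cartesian_tree_encoding_numeric := by
  intro subseq _
  unfold Spec_cartesian_tree_encoding_numeric cartesian_tree_encoding_numeric_alt
  rw [pvA_eq_spine, pvRunB subseq.length subseq 0 le_rfl]
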